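-- pv_equiv track=rewrite | github.com/lynnux/.emacs.d | packages/tools/elisp-autofmt.py | calc_over_long_line_length_test
-- ===== SOURCE A (Python) =====
-- def calc_over_long_line_length_test(data: str, fill_column: int, trailing_parens: int, line_terminate: int) -> int:
--     '''
--     Return zero when all lines are within the ``fill_column``, otherwise 1.
--     '''
--
--     # Step over `\n` characters instead of `data.split('\n')`
--     # so multiple characters are handled separately.
--     line_step = 0
--     i = 0
--
--     if line_terminate != -1:
--         while line_step != -1:
--             line_step_next = data.find('\n', line_step)
--             if line_step_next == -1:
--                 line_length = len(data) - line_step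
--                 line_step = -1
--             else:
--                 line_length = line_step_next - line_step
--                 line_step = line_step_next + 1
--
--             if line_terminate == i:
--                 line_length += trailing_parens
--                 if line_length > fill_column:
--                     return 1
--                 break
--             if line_length > fill_column:
--                 return 1
--             i += 1
--     else:
--         while line_step != -1:
--             line_step_next = data.find('\n', line_step)
--             if line_step_next == -1:
--                 line_length = len(data) - line_step
--                 line_step = -1
--             else:
--                 line_length = line_step_next - line_step
--                 line_step = line_step_next + 1
--
--             if line_length > fill_column:
--                 return 1
--             i += 1
--
--     return 0
-- ===== SOURCE B (Python) =====
-- def calc_over_long_line_length_test(data: str, fill_column: int, trailing_parens: int, line_terminate: int) -> int: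
--     '''
--     Return zero when all lines are within the ``fill_column``, otherwise 1.
--     '''
--     # Materialize the lines once and scan them with one unified loop:
--     # `line_terminate == -1` can never equal a non-negative line index,
--     # so A's two separate while-loops collapse into this single one.
--     for i, line in enumerate(data.split('\n')):
--         if i == line_terminate:
--             return 1 if len(line) + trailing_parens > fill_column else 0
--         if len(line) > fill_column:
--             return 1
--     return 0
-- ===== Notes on version B (the rewrite author's own statement) =====
-- stated objective: simpler
-- what changed: B materializes the lines once with data.split('\n') and scans them in a single enumerate loop, instead of A's two separate while-loops that step through the string with repeated data.find('\n', pos) index arithmetic.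
import Mathlib
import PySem

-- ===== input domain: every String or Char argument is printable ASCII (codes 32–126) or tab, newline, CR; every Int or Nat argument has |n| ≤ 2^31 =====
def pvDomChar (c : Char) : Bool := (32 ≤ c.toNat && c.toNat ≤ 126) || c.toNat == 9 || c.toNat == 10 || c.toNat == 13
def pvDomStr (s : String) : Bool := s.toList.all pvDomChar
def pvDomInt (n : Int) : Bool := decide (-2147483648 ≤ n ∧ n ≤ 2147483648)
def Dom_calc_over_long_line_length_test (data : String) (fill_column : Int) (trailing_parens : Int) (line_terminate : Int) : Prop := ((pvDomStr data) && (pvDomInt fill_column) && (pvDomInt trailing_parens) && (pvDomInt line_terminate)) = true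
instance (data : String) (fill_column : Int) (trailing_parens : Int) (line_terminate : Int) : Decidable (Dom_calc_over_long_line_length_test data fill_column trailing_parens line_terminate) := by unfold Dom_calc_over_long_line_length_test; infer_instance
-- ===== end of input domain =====

-- B replaces A's two find('\n')-stepping while-loops by one split('\n')-then-enumerate scan (objective: simpler).

-- ===== PORT A =====
-- A's index `line_step` always points into the remainder of the string, so the two
-- while-loops are ported as recursions over the remaining suffix `cs = data[line_step:]`
-- (data.find('\n', line_step) becomes PySem.Chars.find on the suffix; a deliberate
-- step-for-step transcription, loop state {line_step, i} preserved).

-- termination fact for both loops: when find ≠ -1, the found index lies inside cs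
theorem pvFind_lt_length (cs : List Char) (h : PySem.Chars.find cs ['\n'] ≠ -1) :
    (PySem.Chars.find cs ['\n']).toNat < cs.length := by
  have h0 : 0 ≤ PySem.Chars.find cs ['\n'] := by
    have := PySem.Chars.neg_one_le_find cs ['\n']
    omega
  have hspec := (PySem.Chars.find_spec h0).1
  have hlen : 1 ≤ (cs.drop (PySem.Chars.find cs ['\n']).toNat).length := by
    have := hspec.length_le
    simpa using this
  have hle := PySem.Chars.find_le_length cs ['\n']
  simp [List.length_drop] at hlen
  omega

-- A, first while-loop (the `line_terminate != -1` branch)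
def pvA_term (fill_column trailing_parens line_terminate : Int) (cs : List Char) (i : Int) : Int :=
  let nxt := PySem.Chars.find cs ['\n']
  if h : nxt = -1 then
    -- line_length = len(data) - line_step; line_step = -1 (loop will end)
    if line_terminate = i then
      if (cs.length : Int) + trailing_parens > fill_column then 1 else 0
    else if (cs.length : Int) > fill_column then 1 else 0
  else
    -- line_length = line_step_next - line_step; line_step = line_step_next + 1
    if line_terminate = i then
      if nxt + trailing_parens > fill_column then 1 else 0
    else if nxt > fill_column then 1
    else pvA_term fill_column trailing_parens line_terminate (cs.drop (nxt.toNat + 1)) (i + 1)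
termination_by cs.length
decreasing_by
  have := pvFind_lt_length cs h
  simp [List.length_drop]
  omega

-- A, second while-loop (the `line_terminate == -1` branch; the counter i is dead there)
def pvA_noterm (fill_column : Int) (cs : List Char) : Int :=
  let nxt := PySem.Chars.find cs ['\n']
  if h : nxt = -1 then
    if (cs.length : Int) > fill_column then 1 else 0
  else if nxt > fill_column then 1
  else pvA_noterm fill_column (cs.drop (nxt.toNat + 1))
termination_by cs.length
decreasing_by
  have := pvFind_lt_length cs h
  simp [List.length_drop]
  omega

def calc_over_long_line_length_test (data : String) (fill_column : Int) (trailing_parens : Int) (line_terminate : Int) : Int :=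
  if line_terminate ≠ -1 then
    pvA_term fill_column trailing_parens line_terminate data.toList 0
  else
    pvA_noterm fill_column data.toList

-- ===== PORT B =====
-- B: for i, line in enumerate(data.split('\n')): …
def pvB_loop (fill_column trailing_parens line_terminate : Int) (lines : List (List Char)) (i : Int) : Int :=
  match lines with
  | [] => 0
  | line :: rest =>
    if i = line_terminate then
      if (line.length : Int) + trailing_parens > fill_column then 1 else 0
    else if (line.length : Int) > fill_column then 1
    else pvB_loop fill_column trailing_parens line_terminate rest (i + 1)

def calc_over_long_line_length_test_alt (data : String) (fill_column : Int) (trailing_parens : Int) (line_terminate : Int) : Int :=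
  pvB_loop fill_column trailing_parens line_terminate (PySem.Chars.splitOn data.toList ['\n']) 0

-- ===== PRECONDITION & SPEC =====
def Spec_calc_over_long_line_length_test (data : String) (fill_column : Int) (trailing_parens : Int) (line_terminate : Int) (out : Int) : Prop := out = calc_over_long_line_length_test_alt data fill_column trailing_parens line_terminate
instance (data : String) (fill_column : Int) (trailing_parens : Int) (line_terminate : Int) (out : Int) : Decidable (Spec_calc_over_long_line_length_test data fill_column trailing_parens line_terminate out) := by unfold Spec_calc_over_long_line_length_test; infer_instance

-- ===== CLAIM (what is proved, stated in full; the proofs are below) =====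
def Claim_equal_calc_over_long_line_length_test : Prop := ∀ (data : String) (fill_column : Int) (trailing_parens : Int) (line_terminate : Int), Dom_calc_over_long_line_length_test data fill_column trailing_parens line_terminate → Spec_calc_over_long_line_length_test data fill_column trailing_parens line_terminate (calc_over_long_line_length_test data fill_column trailing_parens line_terminate)

-- ===== LEMMAS AND PROOFS =====

-- reference split function: split on '\n', structurally
def pvSplit : List Char → List (List Char)
  | [] => [[]]
  | c :: rest =>
    if c = '\n' then [] :: pvSplit rest
    else
      match pvSplit rest with
      | [] => [[c]]  -- unreachable
      | h :: t => (c :: h) :: t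

theorem pvSplit_ne_nil (cs : List Char) : pvSplit cs ≠ [] := by
  cases cs with
  | nil => simp [pvSplit]
  | cons c rest =>
    by_cases hc : c = '\n'
    · simp [pvSplit, hc]
    · simp only [pvSplit, hc, if_false]
      cases pvSplit rest <;> simp

-- find.go offset shift
theorem pvGo_shift (t : List Char) (k : Nat) :
    PySem.Chars.find.go ['\n'] t k =
      if PySem.Chars.find.go ['\n'] t 0 = -1 then -1
      else PySem.Chars.find.go ['\n'] t 0 + k := by
  induction t generalizing k with
  | nil => simp [PySem.Chars.find.go]
  | cons c rest ih =>
    by_cases hp : List.isPrefixOf ['\n'] (c :: rest)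
    · simp [PySem.Chars.find.go, hp]
    · have hnn : -1 ≤ PySem.Chars.find.go ['\n'] rest 0 := by
        have := PySem.Chars.neg_one_le_find rest ['\n']
        simpa [PySem.Chars.find] using this
      simp only [PySem.Chars.find.go, hp, Bool.false_eq_true, if_false]
      rw [ih (k + 1), ih 1]
      split_ifs <;> omega

-- find recurrence on a cons
theorem pvFind_cons (c : Char) (rest : List Char) :
    PySem.Chars.find (c :: rest) ['\n'] =
      if c = '\n' then 0
      else if PySem.Chars.find rest ['\n'] = -1 then -1
      else PySem.Chars.find rest ['\n'] + 1 := by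
  by_cases hc : c = '\n'
  · simp [PySem.Chars.find, PySem.Chars.find.go, hc, List.isPrefixOf]
  · have hp : List.isPrefixOf ['\n'] (c :: rest) = false := by
      simp [List.isPrefixOf]
      exact fun h => absurd h.symm hc
    simp only [PySem.Chars.find, PySem.Chars.find.go, hp, Bool.false_eq_true, if_false, hc]
    rw [pvGo_shift]
    split_ifs <;> omega

-- splitOn.go computes acc.reverse ++ pvSplit with the current chunk prepended
theorem pvSplitOn_go (fuel : Nat) (l cur : List Char) (acc : List (List Char))
    (hf : l.length < fuel) :
    PySem.Chars.splitOn.go ['\n'] fuel l cur acc =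
      acc.reverse ++ (pvSplit l).modifyHead (cur.reverse ++ ·) := by
  induction fuel generalizing l cur acc with
  | zero => omega
  | succ f ih =>
    cases l with
    | nil => simp [PySem.Chars.splitOn.go, pvSplit]
    | cons c rest =>
      by_cases hc : c = '\n'
      · have hp : List.isPrefixOf ['\n'] (c :: rest) = true := by simp [List.isPrefixOf, hc]
        rw [show PySem.Chars.splitOn.go ['\n'] (f+1) (c :: rest) cur acc =
              PySem.Chars.splitOn.go ['\n'] f (List.drop 1 (c :: rest)) [] (cur.reverse :: acc) by
            simp [PySem.Chars.splitOn.go, hp]]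
        rw [ih (List.drop 1 (c :: rest)) [] (cur.reverse :: acc) (by simp at hf ⊢; omega)]
        simp only [List.drop_one, List.tail_cons, pvSplit, hc, if_true, List.reverse_cons]
        cases pvSplit rest <;> simp
      · have hp : List.isPrefixOf ['\n'] (c :: rest) = false := by
          simp [List.isPrefixOf]
          exact fun h => absurd h.symm hc
        rw [show PySem.Chars.splitOn.go ['\n'] (f+1) (c :: rest) cur acc =
              PySem.Chars.splitOn.go ['\n'] f rest (c :: cur) acc by
            simp [PySem.Chars.splitOn.go, hp]]
        rw [ih rest (c :: cur) acc (by simp at hf; omega)]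
        cases hsp : pvSplit rest with
        | nil => exact absurd hsp (pvSplit_ne_nil rest)
        | cons h t => simp [pvSplit, hc, hsp]

theorem pvSplitOn_eq (cs : List Char) :
    PySem.Chars.splitOn cs ['\n'] = pvSplit cs := by
  rw [show PySem.Chars.splitOn cs ['\n'] = PySem.Chars.splitOn.go ['\n'] (cs.length + 1) cs [] [] from rfl]
  rw [pvSplitOn_go (cs.length + 1) cs [] [] (by omega)]
  cases pvSplit cs <;> simp

-- pvSplit of a string without '\n' is the single line
theorem pvSplit_no_newline (cs : List Char) (h : PySem.Chars.find cs ['\n'] = -1) :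
    pvSplit cs = [cs] := by
  induction cs with
  | nil => simp [pvSplit]
  | cons c rest ih =>
    rw [pvFind_cons] at h
    by_cases hc : c = '\n'
    · simp [hc] at h
    · simp only [hc, if_false] at h
      have hrest : PySem.Chars.find rest ['\n'] = -1 := by
        by_contra hne
        simp [hne] at h
        have := PySem.Chars.neg_one_le_find rest ['\n']
        omega
      simp [pvSplit, hc, ih hrest]

-- pvSplit peels off exactly the chunk before the first '\n' found
theorem pvSplit_found (cs : List Char) (h : PySem.Chars.find cs ['\n'] ≠ -1) :
    pvSplit cs = cs.take (PySem.Chars.find cs ['\n']).toNat ::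
      pvSplit (cs.drop ((PySem.Chars.find cs ['\n']).toNat + 1)) := by
  induction cs with
  | nil => simp [PySem.Chars.find, PySem.Chars.find.go] at h
  | cons c rest ih =>
    rw [pvFind_cons] at h ⊢
    by_cases hc : c = '\n'
    · simp [pvSplit, hc]
    · simp only [hc, if_false] at h ⊢
      have hrest : PySem.Chars.find rest ['\n'] ≠ -1 := by
        by_contra hne
        simp [hne] at h
      have h0 : 0 ≤ PySem.Chars.find rest ['\n'] := by
        have := PySem.Chars.neg_one_le_find rest ['\n']
        omega
      have htn : (PySem.Chars.find rest ['\n'] + 1).toNat = (PySem.Chars.find rest ['\n']).toNat + 1 := by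
        omega
      simp only [hrest, if_false, htn]
      rw [pvSplit, if_neg hc, ih hrest]
      simp

-- length of the first chunk, as an Int, is the found index
theorem pvTake_length_int (cs : List Char) (h : PySem.Chars.find cs ['\n'] ≠ -1) :
    ((cs.take (PySem.Chars.find cs ['\n']).toNat).length : Int) = PySem.Chars.find cs ['\n'] := by
  have hlt := pvFind_lt_length cs h
  have h0 : 0 ≤ PySem.Chars.find cs ['\n'] := by
    have := PySem.Chars.neg_one_le_find cs ['\n']
    omega
  simp [List.length_take]
  omega

-- main lemma, branch line_terminate ≠ -1: A's first loop = B's loop on pvSplit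
theorem pvA_term_eq (fill_column trailing_parens line_terminate : Int) (cs : List Char) (i : Int) :
    pvA_term fill_column trailing_parens line_terminate cs i =
      pvB_loop fill_column trailing_parens line_terminate (pvSplit cs) i := by
  fun_induction pvA_term fill_column trailing_parens line_terminate cs i
  case case1 cs nxt h hc =>
    rw [pvSplit_no_newline cs h]
    simp [pvB_loop, hc]
  case case2 cs nxt h hc =>
    rw [pvSplit_no_newline cs h]
    simp [pvB_loop, hc]
  case case3 cs i nxt h ht hc =>
    have ht' : ¬ i = line_terminate := fun he => ht he.symm
    rw [pvSplit_no_newline cs h]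
    simp [pvB_loop, ht', hc]
  case case4 cs i nxt h ht hc =>
    have ht' : ¬ i = line_terminate := fun he => ht he.symm
    rw [pvSplit_no_newline cs h]
    simp [pvB_loop, ht', hc]
  case case5 cs nxt h hc =>
    have h' : PySem.Chars.find cs ['\n'] ≠ -1 := h
    have hc' : PySem.Chars.find cs ['\n'] + trailing_parens > fill_column := hc
    rw [pvSplit_found cs h']
    simp only [pvB_loop, pvTake_length_int cs h']
    simp [hc']
  case case6 cs nxt h hc =>
    have h' : PySem.Chars.find cs ['\n'] ≠ -1 := h
    have hc' : ¬ PySem.Chars.find cs ['\n'] + trailing_parens > fill_column := hc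
    rw [pvSplit_found cs h']
    simp only [pvB_loop, pvTake_length_int cs h']
    simp [hc']
  case case7 cs i nxt h ht hc =>
    have h' : PySem.Chars.find cs ['\n'] ≠ -1 := h
    have hc' : PySem.Chars.find cs ['\n'] > fill_column := hc
    have ht' : ¬ i = line_terminate := fun he => ht he.symm
    rw [pvSplit_found cs h']
    simp only [pvB_loop, pvTake_length_int cs h']
    simp [ht', hc']
  case case8 cs i nxt h ht hc ih =>
    have h' : PySem.Chars.find cs ['\n'] ≠ -1 := h
    have hc' : ¬ PySem.Chars.find cs ['\n'] > fill_column := hc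
    have ht' : ¬ i = line_terminate := fun he => ht he.symm
    rw [pvSplit_found cs h']
    simp only [pvB_loop, pvTake_length_int cs h', ht', if_false, hc']
    exact ih

-- main lemma, branch line_terminate = -1: A's second loop = B's loop (i stays ≥ 0, never -1)
theorem pvA_noterm_eq (fill_column trailing_parens : Int) (cs : List Char) (i : Int) (hi : 0 ≤ i) :
    pvA_noterm fill_column cs =
      pvB_loop fill_column trailing_parens (-1) (pvSplit cs) i := by
  fun_induction pvA_noterm fill_column cs generalizing i
  case case1 cs nxt h hc =>
    have hne : ¬ i = -1 := by omega
    rw [pvSplit_no_newline cs h]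
    simp [pvB_loop, hne, hc]
  case case2 cs nxt h hc =>
    have hne : ¬ i = -1 := by omega
    rw [pvSplit_no_newline cs h]
    simp [pvB_loop, hne, hc]
  case case3 cs nxt h hc =>
    have h' : PySem.Chars.find cs ['\n'] ≠ -1 := h
    have hc' : PySem.Chars.find cs ['\n'] > fill_column := hc
    have hne : ¬ i = -1 := by omega
    rw [pvSplit_found cs h']
    simp only [pvB_loop, pvTake_length_int cs h']
    simp [hne, hc']
  case case4 cs nxt h hc ih =>
    have h' : PySem.Chars.find cs ['\n'] ≠ -1 := h
    have hc' : ¬ PySem.Chars.find cs ['\n'] > fill_column := hc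
    have hne : ¬ i = -1 := by omega
    rw [pvSplit_found cs h']
    simp only [pvB_loop, pvTake_length_int cs h', hne, if_false, if_neg hc']
    exact ih (i + 1) (by omega)

-- ===== VERDICT (by name: the statement is the Claim_ definition above) =====
theorem calc_over_long_line_length_test_spec : Claim_equal_calc_over_long_line_length_test := by
  intro data fill_column trailing_parens line_terminate _
  unfold Spec_calc_over_long_line_length_test
  unfold calc_over_long_line_length_test calc_over_long_line_length_test_alt
  rw [pvSplitOn_eq]
  by_cases h : line_terminate = -1
  · simp only [h, ne_eq, not_true_eq_false, if_false]
    exact pvA_noterm_eq fill_column trailing_parens data.toList 0 (by omega)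
  · simp only [ne_eq, h, not_false_eq_true, if_true]
    exact pvA_term_eq fill_column trailing_parens line_terminate data.toList 0
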